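-- pv_equiv track=rewrite | github.com/drorFruchter/Intro2CS-Course | ex5_other/cartoonify.py | add_frame_to_image
-- ===== SOURCE A (Python) =====
-- from typing import List
-- from copy import deepcopy
-- from math import floor, sqrt
--
-- def add_frame_to_image(image: List[List[int]], frame_val: int, k: int):
--     """
--         Adds a frame to a 2D list
--         :param image - a 2D list
--         :param frame_val - the value of the frame elements
--         :param k - adds a frame of the size (k-1)//2
--         :return a new framed list
--     """
--     framed_image: List[List[int]] = deepcopy(image)
--     for i in range(len(image)):
--         for _ in range(2):
--             framed_image[i].extend([frame_val]*(floor((k-1)/2)))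
--             framed_image[i] = framed_image[i][::-1]
--     if k > 0:
--         top = [frame_val for _ in range(len(framed_image[0]))]
--         for _ in range(int((k-1)/2)):
--             framed_image = [top] + framed_image + [top]
--     return framed_image
-- ===== SOURCE B (Python) =====
-- def add_frame_to_image(image, frame_val, k):
--     """Frame a 2D list by coordinate mapping: each output cell (i, j) is looked up
--     back in the source image if it lands inside it, otherwise it is frame_val.
--     No concatenation of padding segments and no border lists are ever built."""
--     pad = max((k - 1) // 2, 0)
--     n = len(image)
--
--     def out_row(i):
--         if pad <= i < pad + n:
--             src = image[i - pad]
--         else: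
--             src = image[0]  # border row: width taken from the first source row
--         return [src[j - pad] if pad <= i < pad + n and pad <= j < pad + len(src)
--                 else frame_val
--                 for j in range(len(src) + 2 * pad)]
--
--     return [out_row(i) for i in range(n + 2 * pad)]
-- ===== Notes on version B (the rewrite author's own statement) =====
-- stated objective: alternative
-- what changed: B generates the output grid cell-by-cell from output coordinates, mapping each (i, j) back into the source image with a bounds test (frame_val outside), instead of A's deepcopy, per-row extend-then-double-reverse padding and the loop that re-wraps the whole image in border rows once per layer.
import Mathlib
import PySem

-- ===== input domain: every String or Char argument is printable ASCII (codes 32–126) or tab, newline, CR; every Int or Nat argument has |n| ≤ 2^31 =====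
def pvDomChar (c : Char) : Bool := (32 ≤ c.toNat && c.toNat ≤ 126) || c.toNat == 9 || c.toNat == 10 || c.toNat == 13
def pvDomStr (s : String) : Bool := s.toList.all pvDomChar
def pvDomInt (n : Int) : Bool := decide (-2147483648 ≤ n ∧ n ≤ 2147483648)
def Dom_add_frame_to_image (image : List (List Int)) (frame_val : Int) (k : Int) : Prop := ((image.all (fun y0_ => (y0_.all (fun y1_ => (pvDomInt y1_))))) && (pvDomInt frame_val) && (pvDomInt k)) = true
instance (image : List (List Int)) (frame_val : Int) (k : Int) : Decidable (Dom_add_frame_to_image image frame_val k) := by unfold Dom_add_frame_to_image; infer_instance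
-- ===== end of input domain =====

-- B generates every output cell directly from its output coordinates (look the cell up in the
-- source image if it maps inside it, else frame_val), instead of A's deepcopy + per-row
-- extend/double-reverse + one whole-image re-wrap per border row. Return-value equivalence only.

-- ===== PORT A =====
-- floor((k-1)/2) via float division: exact as integer floor division for |k| ≤ 2^31 (Dom)
-- int((k-1)/2): truncation toward zero, exact as Int.tdiv on this domain
-- framed_image[0] raises IndexError when framed_image = []; Pre_ excludes that case (headD is a placeholder there)
def add_frame_to_image (image : List (List Int)) (frame_val : Int) (k : Int) : List (List Int) :=
  let framed := image.map (fun row =>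
    (List.range 2).foldl
      (fun r _ => (r ++ List.replicate (PySem.Int.floordiv (k - 1) 2).toNat frame_val).reverse)
      row)
  if k > 0 then
    let top := List.replicate (framed.headD []).length frame_val
    (List.range ((k - 1).tdiv 2).toNat).foldl (fun f _ => [top] ++ f ++ [top]) framed
  else framed

-- ===== PORT B =====
-- image[i-pad] / image[0] / src[j-pad] are only evaluated at indices the guards prove in
-- range on every input Pre_ admits; getD is the placeholder outside Pre_.
def add_frame_to_image_alt (image : List (List Int)) (frame_val : Int) (k : Int) : List (List Int) :=
  let pad := (max (PySem.Int.floordiv (k - 1) 2) 0).toNat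
  let n := image.length
  (List.range (n + 2 * pad)).map (fun i =>
    let src := if pad ≤ i ∧ i < pad + n then image.getD (i - pad) [] else image.getD 0 []
    (List.range (src.length + 2 * pad)).map (fun j =>
      if (pad ≤ i ∧ i < pad + n) ∧ pad ≤ j ∧ j < pad + src.length
      then src.getD (j - pad) 0 else frame_val))

-- ===== PRECONDITION & SPEC =====
-- Pre_ excludes only the inputs where Python A raises IndexError: k > 0 with an empty image
-- (framed_image[0] on the empty list).
def Pre_add_frame_to_image (image : List (List Int)) (frame_val : Int) (k : Int) : Prop :=
  k ≤ 0 ∨ image ≠ []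
instance (image : List (List Int)) (frame_val : Int) (k : Int) : Decidable (Pre_add_frame_to_image image frame_val k) := by unfold Pre_add_frame_to_image; infer_instance
def pvWitness_add_frame_to_image : List (List Int) × Int × Int := ([[1, 2], [3, 4]], 9, 4)

def Spec_add_frame_to_image (image : List (List Int)) (frame_val : Int) (k : Int) (out : List (List Int)) : Prop := out = add_frame_to_image_alt image frame_val k
instance (image : List (List Int)) (frame_val : Int) (k : Int) (out : List (List Int)) : Decidable (Spec_add_frame_to_image image frame_val k out) := by unfold Spec_add_frame_to_image; infer_instance

-- ===== CLAIM (what is proved, stated in full; the proofs are below) =====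
def Claim_equal_add_frame_to_image : Prop := ∀ (image : List (List Int)) (frame_val : Int) (k : Int), Dom_add_frame_to_image image frame_val k → Pre_add_frame_to_image image frame_val k → Spec_add_frame_to_image image frame_val k (add_frame_to_image image frame_val k)
-- ===== LEMMAS AND PROOFS =====

-- A's extend-then-reverse, done twice, pads the row on both sides.
theorem pv_row_eq (row : List Int) (v : Int) (n : Nat) :
    (List.range 2).foldl (fun r _ => (r ++ List.replicate n v).reverse) row
      = List.replicate n v ++ row ++ List.replicate n v := by
  simp [show List.range 2 = [0, 1] from rfl, List.foldl]

-- A's repeated [top] + framed + [top] wrap equals one replicate on each side.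
theorem pv_wrap_eq (top : List Int) (base : List (List Int)) (n : Nat) :
    (List.range n).foldl (fun f _ => [top] ++ f ++ [top]) base
      = List.replicate n top ++ base ++ List.replicate n top := by
  induction n with
  | zero => simp
  | succ m ih =>
    rw [List.range_succ, List.foldl_append, ih]
    simp [List.replicate_succ]
    rw [← List.replicate_succ', List.replicate_succ]

theorem pv_tdiv_eq (k : Int) (hk : 0 < k) :
    ((k - 1).tdiv 2).toNat = (max (PySem.Int.floordiv (k - 1) 2) 0).toNat := by
  rw [Int.tdiv_eq_ediv_of_nonneg (by omega), PySem.Int.floordiv_eq_ediv_of_pos (by omega)]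
  omega

-- Coordinate generation of a padded sequence equals the concatenated form.
theorem pv_grid {α β : Type} (xs : List α) (d : α) (p : Nat) (g : α → β) (t : β) :
    (List.range (xs.length + 2 * p)).map
      (fun i => if p ≤ i ∧ i < p + xs.length then g (xs.getD (i - p) d) else t)
      = List.replicate p t ++ xs.map g ++ List.replicate p t := by
  apply List.ext_getElem
  · simp; omega
  · intro i h1 h2
    simp only [List.getElem_map, List.getElem_range]
    by_cases hmid : i < p + xs.length
    · rw [List.getElem_append_left (by simp; omega)]
      by_cases hlo : p ≤ i
      · rw [if_pos ⟨hlo, hmid⟩, List.getElem_append_right (by simp; omega), List.getElem_map]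
        rw [List.getD_eq_getElem xs d (by simp at h1 ⊢; omega)]
        congr 1 <;> simp
      · rw [if_neg (by omega), List.getElem_append_left (by simp; omega), List.getElem_replicate]
    · rw [if_neg (by omega), List.getElem_append_right (by simp; omega), List.getElem_replicate]

-- ===== VERDICT =====
theorem add_frame_to_image_spec : Claim_equal_add_frame_to_image := by
  intro image fv k _ hpre
  unfold Spec_add_frame_to_image add_frame_to_image add_frame_to_image_alt
  by_cases hk : k > 0
  · have hd : 0 ≤ PySem.Int.floordiv (k - 1) 2 := by
      rw [PySem.Int.floordiv_eq_ediv_of_pos (by omega)]; omega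
    have hmax : max (PySem.Int.floordiv (k - 1) 2) 0 = PySem.Int.floordiv (k - 1) 2 := by omega
    set p := (PySem.Int.floordiv (k - 1) 2).toNat with hp
    obtain ⟨r0, rest, rfl⟩ : ∃ r0 rest, image = r0 :: rest := by
      rcases image with _ | ⟨r0, rest⟩
      · exact absurd rfl (hpre.resolve_left (by omega))
      · exact ⟨r0, rest, rfl⟩
    simp only [hk, if_true, pv_row_eq, pv_wrap_eq, pv_tdiv_eq k hk, hmax, ← hp,
      List.map_cons, List.headD_cons]
    have houter := pv_grid (α := List Int) (β := List Int) (r0 :: rest) [] p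
      (fun src => (List.range (src.length + 2 * p)).map (fun j =>
          if p ≤ j ∧ j < p + src.length then src.getD (j - p) 0 else fv))
      ((List.range (r0.length + 2 * p)).map (fun _ => fv))
    have hbody : (List.range ((r0 :: rest).length + 2 * p)).map (fun i =>
        let src := if p ≤ i ∧ i < p + (r0 :: rest).length
                   then (r0 :: rest).getD (i - p) [] else (r0 :: rest).getD 0 []
        (List.range (src.length + 2 * p)).map (fun j =>
          if (p ≤ i ∧ i < p + (r0 :: rest).length) ∧ p ≤ j ∧ j < p + src.length
          then src.getD (j - p) 0 else fv))
        = (List.range ((r0 :: rest).length + 2 * p)).map (fun i =>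
          if p ≤ i ∧ i < p + (r0 :: rest).length
          then (fun src => (List.range (src.length + 2 * p)).map (fun j =>
            if p ≤ j ∧ j < p + src.length then src.getD (j - p) 0 else fv))
              ((r0 :: rest).getD (i - p) [])
          else (List.range (r0.length + 2 * p)).map (fun _ => fv)) := by
      apply List.map_congr_left
      intro i _
      by_cases h : p ≤ i ∧ i < p + (r0 :: rest).length
      · have ha := h.1
        have hb : i < p + (rest.length + 1) := by simpa using h.2
        simp [ha, hb]
      · have hx : ¬(p ≤ i ∧ i < p + (rest.length + 1)) := by simpa using h
        simp [hx]
    rw [hbody, houter]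
    have htopB : (List.range (r0.length + 2 * p)).map (fun _ : ℕ => fv)
        = List.replicate (r0.length + 2 * p) fv := by
      apply List.ext_getElem <;> simp
    have hlen : (List.replicate p fv ++ r0 ++ List.replicate p fv).length = r0.length + 2 * p := by
      simp; ring
    rw [htopB, hlen]
    simp only [List.map_cons]
    congr 1
    congr 1
    congr 1
    · have hg := pv_grid r0 0 p id fv
      simp only [List.map_id, id_eq] at hg
      exact hg.symm
    · apply List.map_congr_left
      intro row _
      have hg := pv_grid row 0 p id fv
      simp only [List.map_id, id_eq] at hg
      exact hg.symm
  · -- k ≤ 0: pad is 0 on both sides, both return the image unchanged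
    have hd : PySem.Int.floordiv (k - 1) 2 < 0 := by
      have := PySem.Int.floordiv_lt_iff_lt_mul (a := k - 1) (b := 2) (q := 0) (by omega)
      omega
    have h0 : (PySem.Int.floordiv (k - 1) 2).toNat = 0 := by omega
    have hm : (max (PySem.Int.floordiv (k - 1) 2) 0).toNat = 0 := by omega
    simp only [hk, if_false, h0, hm, Nat.mul_zero, Nat.add_zero,
      show List.range 2 = [0, 1] from rfl, List.foldl,
      List.replicate_zero, List.append_nil, List.reverse_reverse]
    apply Eq.symm
    apply List.ext_getElem
    · simp
    · intro i h1 h2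
      have hi : i < image.length := by simpa using h2
      simp only [List.getElem_map, List.getElem_range, Nat.sub_zero, Nat.zero_add]
      rw [if_pos ⟨Nat.zero_le _, by omega⟩, List.getD_eq_getElem image [] (by omega)]
      apply List.ext_getElem
      · simp
      · intro j j1 j2
        have hj : j < image[i].length := by simpa using j2
        simp only [List.getElem_map, List.getElem_range]
        rw [if_pos ⟨⟨Nat.zero_le _, by omega⟩, Nat.zero_le _, by omega⟩,
          List.getD_eq_getElem _ 0 (by omega)]
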